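-- pv_equiv track=rewrite | github.com/personalcomputer/tableconv | adapters/df/ascii.py | render_asciiborderless
-- ===== SOURCE A (Python) =====
-- def _render_value(value):
--     if value is None:
--         return ''
--     return str(value).replace('\n', '\\n')
--
-- def _get_serialized_rows(rows):
--     return [{key: _render_value(value) for key, value in row.items()} for row in rows]
--
-- def _get_column_max_lengths(rows, column_names):
--     return {column: max([len(row[column]) for row in rows] + [len(column)]) for column in column_names}
--
-- def render_asciiborderless(ordered_fields, rows):
--     """ Text table rendering inspired by psql. """
--     serialized_rows = _get_serialized_rows(rows)
--     max_lengths = _get_column_max_lengths(serialized_rows, ordered_fields)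
--
--     output_lines = []
--     output_lines.append(' ' + ' | '.join([field.center(max_lengths[field]) for field in ordered_fields]) + ' ')
--     output_lines.append('-' + '-+-'.join(['-'*max_lengths[field] for field in ordered_fields]) + '-')
--     for row in serialized_rows:
--         rendered_values_list = []
--         for field in ordered_fields:
--             rendered_values_list.append(row[field].ljust(max_lengths[field]))
--         output_lines.append(' ' + ' | '.join(rendered_values_list) + ' ')
--     # Fully imitate psql by adding row count
--     # if len(rows) == 1:
--     #     output_lines.append(f'({len(rows)} row)')
--     # else:
--     #     output_lines.append(f'({len(rows)} rows)')
--     return '\n'.join(output_lines)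
-- ===== SOURCE B (Python) =====
-- def render_asciiborderless(ordered_fields, rows):
--     """ Text table rendering inspired by psql (column-major: build padded column
--     blocks, then stitch the table line by line). """
--     columns = []
--     for field in ordered_fields:
--         cells = ['' if row[field] is None else str(row[field]).replace('\n', '\\n')
--                  for row in rows]
--         width = max([len(field)] + [len(c) for c in cells])
--         columns.append([field.center(width), '-' * width]
--                        + [c.ljust(width) for c in cells])
--     lines = []
--     for i in range(len(rows) + 2):
--         sep, pad = ('-+-', '-') if i == 1 else (' | ', ' ')
--         lines.append(pad + sep.join(col[i] for col in columns) + pad)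
--     return '\n'.join(lines)
-- ===== Notes on version B (the rewrite author's own statement) =====
-- stated objective: alternative
-- what changed: B builds the table column-major: for each field it constructs one fully padded column block (centered header, dash run, left-justified cells, each sized to that column's own max) and then stitches the output line by line with an index loop over the column blocks, whereas A serializes rows into dicts, computes a width dict, and emits lines row-major.
import Mathlib
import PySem

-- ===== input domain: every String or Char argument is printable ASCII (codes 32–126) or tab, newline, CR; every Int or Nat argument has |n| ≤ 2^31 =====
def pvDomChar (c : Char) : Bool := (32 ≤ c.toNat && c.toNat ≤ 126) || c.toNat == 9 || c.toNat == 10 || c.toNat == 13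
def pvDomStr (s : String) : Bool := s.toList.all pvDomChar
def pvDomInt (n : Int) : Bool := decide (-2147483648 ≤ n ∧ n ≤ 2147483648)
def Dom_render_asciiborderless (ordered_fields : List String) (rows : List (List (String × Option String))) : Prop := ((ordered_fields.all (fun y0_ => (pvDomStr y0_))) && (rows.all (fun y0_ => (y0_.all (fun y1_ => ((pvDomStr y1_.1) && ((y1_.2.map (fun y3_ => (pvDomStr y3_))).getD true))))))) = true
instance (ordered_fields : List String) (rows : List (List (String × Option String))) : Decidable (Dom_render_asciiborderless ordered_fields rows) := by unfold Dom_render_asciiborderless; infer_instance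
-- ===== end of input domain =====

-- B assembles the table column-major (one padded column block per field, then an index loop stitches lines); A is row-major with a width dict. Return values proved equal on Pre_.

-- shared string-method ports (str.center / str.ljust, exact CPython padding rule)
def pyCenter (s : String) (width : Nat) : String :=
  if width ≤ s.toList.length then s
  else
    let marg := width - s.toList.length
    let left := marg / 2 + (marg &&& width &&& 1)
    String.ofList (List.replicate left ' ' ++ s.toList ++ List.replicate (marg - left) ' ')

def pyLjust (s : String) (width : Nat) : String :=
  if width ≤ s.toList.length then s
  else String.ofList (s.toList ++ List.replicate (width - s.toList.length) ' ')

-- ===== PORT A =====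
def renderValue (value : Option String) : String :=
  match value with
  | none => ""
  | some s => PySem.Str.replace s "\n" "\\n"

-- dict comprehension {key: _render_value(value) for key, value in row.items()}
def serializeRow (row : List (String × Option String)) : PySem.Dict String String :=
  row.foldl (fun d p => d.insert p.1 (renderValue p.2)) PySem.Dict.empty

-- {column: max([len(row[column]) for row in rows] + [len(column)]) for column in column_names}
-- (row[column] as getD with default "" — total form, exact under Pre_; max of the nonempty
--  Nat list written as foldl max 0, exact since all lengths are ≥ 0)
def getColumnMaxLengths (srows : List (PySem.Dict String String)) (columns : List String) : PySem.Dict String Nat :=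
  columns.foldl
    (fun d column =>
      d.insert column (((srows.map (fun row => (row.getD column "").toList.length)) ++ [column.toList.length]).foldl max 0))
    PySem.Dict.empty

def render_asciiborderless (ordered_fields : List String) (rows : List (List (String × Option String))) : String :=
  let serialized := rows.map serializeRow
  let ml := getColumnMaxLengths serialized ordered_fields
  let lines : List String :=
    (" " ++ PySem.Str.join " | " (ordered_fields.map (fun f => pyCenter f (ml.getD f 0))) ++ " ")
    :: ("-" ++ PySem.Str.join "-+-" (ordered_fields.map (fun f => String.ofList (List.replicate (ml.getD f 0) '-'))) ++ "-")
    :: serialized.map (fun row =>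
         " " ++ PySem.Str.join " | " (ordered_fields.map (fun f => pyLjust (row.getD f "") (ml.getD f 0))) ++ " ")
  PySem.Str.join "\n" lines

-- ===== PORT B =====
-- row[field]: indexing the dict the assoc list denotes = value of the LAST occurrence of the key
-- (dict construction collapses duplicate keys, last value wins) — exact; a missing key is
-- totalized to none (Python raises KeyError there; those inputs are outside Pre_).
def rowGet (row : List (String × Option String)) (f : String) : Option String :=
  match row.reverse.find? (fun p => p.1 == f) with
  | some p => p.2
  | none => none

def cellB (v : Option String) : String :=
  match v with
  | none => ""
  | some s => PySem.Str.replace s "\n" "\\n"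

-- one padded column block: centered header, dash run, left-justified cells
-- (max of the nonempty list [len(field)] + lens as a foldl seeded with its head — exact)
def colBlock (rows : List (List (String × Option String))) (f : String) : List String :=
  let cells := rows.map (fun row => cellB (rowGet row f))
  let width := (cells.map (fun c => c.toList.length)).foldl max f.toList.length
  pyCenter f width
    :: String.ofList (List.replicate width '-')
    :: cells.map (fun c => pyLjust c width)

-- range(len(rows) + 2) with a nonnegative literal bound: List.range is exact;
-- col[i] is in range (every block has length len(rows) + 2), ported as getD
def render_asciiborderless_alt (ordered_fields : List String) (rows : List (List (String × Option String))) : String :=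
  let columns := ordered_fields.map (colBlock rows)
  let lines : List String :=
    (List.range (rows.length + 2)).map (fun i =>
      let sep := if i = 1 then "-+-" else " | "
      let pad := if i = 1 then "-" else " "
      pad ++ PySem.Str.join sep (columns.map (fun col => col.getD i "")) ++ pad)
  PySem.Str.join "\n" lines

-- ===== PRECONDITION & SPEC =====
-- A raises KeyError (row[field]) when some ordered field is missing from some row; B raises there too.
def Pre_render_asciiborderless (ordered_fields : List String) (rows : List (List (String × Option String))) : Prop :=
  ∀ row ∈ rows, ∀ f ∈ ordered_fields, f ∈ row.map Prod.fst

instance (ordered_fields : List String) (rows : List (List (String × Option String))) : Decidable (Pre_render_asciiborderless ordered_fields rows) := by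
  unfold Pre_render_asciiborderless; infer_instance

def pvWitness_render_asciiborderless : List String × (List (List (String × Option String))) :=
  (["a"], [[("a", some "x")]])

def Spec_render_asciiborderless (ordered_fields : List String) (rows : List (List (String × Option String))) (out : String) : Prop := out = render_asciiborderless_alt ordered_fields rows
instance (ordered_fields : List String) (rows : List (List (String × Option String))) (out : String) : Decidable (Spec_render_asciiborderless ordered_fields rows out) := by unfold Spec_render_asciiborderless; infer_instance

-- ===== CLAIM (what is proved, stated in full; the proofs are below) =====
def Claim_equal_render_asciiborderless : Prop := ∀ (ordered_fields : List String) (rows : List (List (String × Option String))), Dom_render_asciiborderless ordered_fields rows → Pre_render_asciiborderless ordered_fields rows → Spec_render_asciiborderless ordered_fields rows (render_asciiborderless ordered_fields rows)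

-- ===== LEMMAS AND PROOFS =====

theorem cellB_eq : cellB = renderValue := by
  funext v; cases v <;> rfl

-- lookup in a fold of inserts built from an assoc list = the list's LAST binding for the key
theorem getD_foldl_insert_last (row : List (String × Option String))
    (d : PySem.Dict String String) (f : String) :
    (row.foldl (fun d p => d.insert p.1 (renderValue p.2)) d).getD f ""
      = match row.reverse.find? (fun p => p.1 == f) with
        | some p => renderValue p.2
        | none => d.getD f "" := by
  induction row generalizing d with
  | nil => rfl
  | cons p t ih =>
    simp only [List.foldl_cons, ih, List.reverse_cons, List.find?_append]
    cases t.reverse.find? (fun q => q.1 == f) with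
    | some q => simp
    | none =>
      by_cases hpf : p.1 = f
      · simp [List.find?, hpf]
      · have hb : (p.1 == f) = false := by simp [hpf]
        simp [List.find?, hb, PySem.Dict.getD_insert, Ne.symm hpf]

-- A's serialized cell = B's directly rendered cell (missing keys both give "")
theorem serial_eq (row : List (String × Option String)) (f : String) :
    (serializeRow row).getD f "" = cellB (rowGet row f) := by
  rw [serializeRow, getD_foldl_insert_last, rowGet]
  cases row.reverse.find? (fun p => p.1 == f) with
  | some q => simp [cellB_eq]
  | none => rfl

-- proof-side name for B's per-column width
def widthB (rows : List (List (String × Option String))) (f : String) : Nat :=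
  ((rows.map (fun row => cellB (rowGet row f))).map (fun c => c.toList.length)).foldl
    max f.toList.length

theorem colBlock_eq (rows : List (List (String × Option String))) (f : String) :
    colBlock rows f
      = pyCenter f (widthB rows f)
        :: String.ofList (List.replicate (widthB rows f) '-')
        :: (rows.map (fun row => cellB (rowGet row f))).map
             (fun c => pyLjust c (widthB rows f)) := rfl

theorem colBlock_getD_zero (rows : List (List (String × Option String))) (f : String) :
    (colBlock rows f).getD 0 "" = pyCenter f (widthB rows f) := rfl

theorem colBlock_getD_one (rows : List (List (String × Option String))) (f : String) :
    (colBlock rows f).getD 1 "" = String.ofList (List.replicate (widthB rows f) '-') := rfl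

theorem colBlock_getD_succ (rows : List (List (String × Option String))) (f : String)
    (i : Nat) (hi : i < rows.length) :
    (colBlock rows f).getD (i + 2) "" = pyLjust (cellB (rowGet rows[i] f)) (widthB rows f) := by
  simp only [colBlock_eq, List.getD_cons_succ]
  rw [List.getD_eq_getElem _ _ (by simpa using hi), List.getElem_map, List.getElem_map]

-- lookup through a fold of inserts whose value depends only on the key
theorem getD_foldl_insert_const (fields : List String) (d : PySem.Dict String Nat)
    (v : String → Nat) (f : String) :
    (fields.foldl (fun d c => d.insert c (v c)) d).getD f 0
      = if f ∈ fields then v f else d.getD f 0 := by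
  induction fields generalizing d with
  | nil => simp
  | cons c rest ih =>
    simp only [List.foldl_cons, ih, PySem.Dict.getD_insert, List.mem_cons]
    by_cases hr : f ∈ rest <;> by_cases hc : f = c <;> simp [hr, hc]

-- running max with a shifted seed
theorem foldl_max_shift {α : Type} (g : α → Nat) (l : List α) (a : Nat) :
    l.foldl (fun a x => max a (g x)) a = max a (l.foldl (fun a x => max a (g x)) 0) := by
  induction l generalizing a with
  | nil => simp
  | cons x t ih =>
    simp only [List.foldl_cons]
    rw [ih (max a (g x)), ih (max 0 (g x))]
    omega

-- B's per-column width = A's max_lengths entry, for every listed field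
theorem width_eq (fields : List String) (rows : List (List (String × Option String)))
    (f : String) (hf : f ∈ fields) :
    widthB rows f = (getColumnMaxLengths (rows.map serializeRow) fields).getD f 0 := by
  rw [widthB, getColumnMaxLengths,
    getD_foldl_insert_const fields PySem.Dict.empty
      (fun column => (((rows.map serializeRow).map (fun row => (row.getD column "").toList.length)) ++ [column.toList.length]).foldl max 0) f,
    if_pos hf]
  rw [List.foldl_append, List.map_map, List.map_map, List.foldl_map, List.foldl_map]
  simp only [List.foldl_cons, List.foldl_nil, Function.comp_def, serial_eq]
  rw [foldl_max_shift (fun row => (cellB (rowGet row f)).toList.length) rows f.toList.length,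
    foldl_max_shift (fun row => (cellB (rowGet row f)).toList.length) rows 0]
  omega

-- ===== VERDICT (by name: the statement is the Claim_ definition above) =====
theorem render_asciiborderless_spec : Claim_equal_render_asciiborderless := by
  intro fields rows _ _
  unfold Spec_render_asciiborderless
  simp only [render_asciiborderless, render_asciiborderless_alt]
  congr 1
  have hrange : List.range (rows.length + 2)
      = 0 :: 1 :: (List.range rows.length).map (fun i => i + 2) := by
    rw [List.range_succ_eq_map, List.range_succ_eq_map]
    simp only [List.map_cons, List.map_map, Function.comp_def]
  rw [hrange]
  simp only [List.map_cons, List.map_map, Function.comp_def]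
  refine congrArg₂ _ ?_ (congrArg₂ _ ?_ ?_)
  · -- header line
    have h : fields.map (fun f => (colBlock rows f).getD 0 "")
        = fields.map (fun f =>
            pyCenter f ((getColumnMaxLengths (rows.map serializeRow) fields).getD f 0)) :=
      List.map_congr_left (fun f hf => by rw [colBlock_getD_zero, width_eq fields rows f hf])
    simp only [List.getD_eq_getElem?_getD] at h
    simp [h]
  · -- separator line
    have h : fields.map (fun f => (colBlock rows f).getD 1 "")
        = fields.map (fun f =>
            String.ofList (List.replicate
              ((getColumnMaxLengths (rows.map serializeRow) fields).getD f 0) '-')) :=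
      List.map_congr_left (fun f hf => by rw [colBlock_getD_one, width_eq fields rows f hf])
    simp only [List.getD_eq_getElem?_getD] at h
    simp [h]
  · -- body lines
    apply List.ext_getElem
    · simp
    · intro i h1 h2
      simp only [List.getElem_map, List.getElem_range]
      have hi : i < rows.length := by simpa using h1
      have h : fields.map (fun f => (colBlock rows f).getD (i + 2) "")
          = fields.map (fun f =>
              pyLjust ((serializeRow (rows[i]'hi)).getD f "")
                ((getColumnMaxLengths (rows.map serializeRow) fields).getD f 0)) :=
        List.map_congr_left (fun f hf => by
          rw [colBlock_getD_succ rows f i hi, ← serial_eq, width_eq fields rows f hf])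
      simp only [List.getD_eq_getElem?_getD] at h
      simp [h]
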